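-- pv_equiv track=rewrite | github.com/Semeriuss/A2SV-Labs | contest_problems/code_forces_17/A.py | solve
-- ===== SOURCE A (Python) =====
-- def solve(a, b):
--     def calculate(x, y):
--         total = 0
--         for i in range(len(x) - 1):
--             total += abs(x[i] - x[i + 1]) + abs(y[i] - y[i + 1])
--         return total
--
--     minArr, maxArr = [], []
--     for i in range(len(a)):
--         minArr.append(min(a[i], b[i]))
--         maxArr.append(max(a[i], b[i]))
--
--     return calculate(minArr, maxArr)
-- ===== SOURCE B (Python) =====
-- def solve(a, b):
--     total = 0
--     prev_min = prev_max = 0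
--     for i in range(len(a)):
--         x, y = a[i], b[i]
--         cur_min = x if x < y else y
--         cur_max = y if x < y else x
--         if i > 0:
--             total += abs(cur_min - prev_min) + abs(cur_max - prev_max)
--         prev_min, prev_max = cur_min, cur_max
--     return total
-- ===== Notes on version B (the rewrite author's own statement) =====
-- stated objective: simpler
-- what changed: B computes the answer in one fused pass keeping only the previous min/max pair, never materialising the minArr/maxArr intermediate lists or running a second indexing loop over them.
import Mathlib
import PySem

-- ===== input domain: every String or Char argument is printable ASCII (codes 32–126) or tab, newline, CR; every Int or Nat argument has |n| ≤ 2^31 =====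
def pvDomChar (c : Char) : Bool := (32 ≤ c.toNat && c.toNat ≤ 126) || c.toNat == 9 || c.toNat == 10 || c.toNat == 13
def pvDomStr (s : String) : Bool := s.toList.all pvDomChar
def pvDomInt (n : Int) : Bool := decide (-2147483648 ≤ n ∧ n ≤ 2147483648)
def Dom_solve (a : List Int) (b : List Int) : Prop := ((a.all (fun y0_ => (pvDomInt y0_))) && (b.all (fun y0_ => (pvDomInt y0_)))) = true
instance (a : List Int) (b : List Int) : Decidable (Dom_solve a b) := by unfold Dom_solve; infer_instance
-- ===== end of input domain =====

-- B fuses A's two loops into one pass that keeps only the previous min/max pair,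
-- never building the minArr/maxArr intermediate lists (objective: simpler, O(1) extra space).
-- Return-value equivalence only; neither program mutates its arguments.

-- ===== PORT A =====
-- inner helper 'calculate(x, y)'
def solveCalculate (x : List Int) (y : List Int) : Int :=
  (PySem.List.pyRange 0 ((x.length : Int) - 1) 1).foldl
    (fun total i =>
      total + (|PySem.List.pyGetD x i 0 - PySem.List.pyGetD x (i + 1) 0| +
               |PySem.List.pyGetD y i 0 - PySem.List.pyGetD y (i + 1) 0|)) 0

def solve (a : List Int) (b : List Int) : Int :=
  let p :=
    (PySem.List.pyRange 0 (a.length : Int) 1).foldl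
      (fun (s : List Int × List Int) i =>
        (s.1 ++ [min (PySem.List.pyGetD a i 0) (PySem.List.pyGetD b i 0)],
         s.2 ++ [max (PySem.List.pyGetD a i 0) (PySem.List.pyGetD b i 0)]))
      ([], [])
  solveCalculate p.1 p.2

-- ===== PORT B =====
def solve_alt (a : List Int) (b : List Int) : Int :=
  let s :=
    (PySem.List.pyRange 0 (a.length : Int) 1).foldl
      (fun (s : Int × Int × Int) i =>
        let x := PySem.List.pyGetD a i 0
        let y := PySem.List.pyGetD b i 0
        let curMin := if x < y then x else y
        let curMax := if x < y then y else x
        let total := if 0 < i then s.1 + (|curMin - s.2.1| + |curMax - s.2.2|) else s.1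
        (total, curMin, curMax))
      (0, 0, 0)
  s.1

-- ===== PRECONDITION & SPEC =====
-- A indexes b[i] for every i < len(a), so it raises IndexError when len(b) < len(a); B does too.
def Pre_solve (a : List Int) (b : List Int) : Prop := a.length ≤ b.length
instance (a : List Int) (b : List Int) : Decidable (Pre_solve a b) := by unfold Pre_solve; infer_instance
def pvWitness_solve : List Int × List Int := ([3, -1, 4], [1, 5, -9])
def Spec_solve (a : List Int) (b : List Int) (out : Int) : Prop := out = solve_alt a b
instance (a : List Int) (b : List Int) (out : Int) : Decidable (Spec_solve a b out) := by unfold Spec_solve; infer_instance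

-- ===== CLAIM (what is proved, stated in full; the proofs are below) =====
def Claim_equal_solve : Prop := ∀ (a : List Int) (b : List Int), Dom_solve a b → Pre_solve a b → Spec_solve a b (solve a b)

-- ===== LEMMAS AND PROOFS =====

-- A's building loop produces the two maps
theorem pv_pairfold (f g : Nat → Int) (n : Nat) (p : List Int × List Int) :
    (List.range n).foldl (fun (s : List Int × List Int) k => (s.1 ++ [f k], s.2 ++ [g k])) p
      = (p.1 ++ (List.range n).map f, p.2 ++ (List.range n).map g) := by
  induction n generalizing p with
  | zero => simp
  | succ n ih => simp [List.range_succ, List.foldl_append, ih]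

-- indexing the image of List.range
theorem pv_getD_map_range (f : Nat → Int) (n k : Nat) (hk : k < n) (d : Int) :
    ((List.range n).map f).getD k d = f k := by
  rw [List.getD_eq_getElem?_getD]
  simp [hk]

-- A's 'calculate' on the two maps is a fold of index differences over List.range (n-1)
theorem pv_calc_eval (f g : Nat → Int) (n : Nat) :
    solveCalculate ((List.range n).map f) ((List.range n).map g)
      = (List.range (n - 1)).foldl
          (fun t k => t + (|f k - f (k + 1)| + |g k - g (k + 1)|)) 0 := by
  unfold solveCalculate
  rw [PySem.List.pyRange_one]
  have hlen : ((((List.range n).map f).length : Int) - 1 - 0).toNat = n - 1 := by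
    simp
  rw [hlen, List.foldl_map]
  apply PySem.List.foldl_congr_mem
  intro acc k hk
  have hk' : k < n - 1 := List.mem_range.mp hk
  have h1 : PySem.List.pyGetD ((List.range n).map f) (0 + (k : Int)) 0 = f k := by
    rw [show (0 + (k : Int)) = ((k : Nat) : Int) by ring, PySem.List.pyGetD_natCast,
      pv_getD_map_range f n k (by omega)]
  have h2 : PySem.List.pyGetD ((List.range n).map f) (0 + (k : Int) + 1) 0 = f (k + 1) := by
    rw [show (0 + (k : Int) + 1) = (((k + 1 : Nat)) : Int) by push_cast; ring,
      PySem.List.pyGetD_natCast, pv_getD_map_range f n (k + 1) (by omega)]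
  have h3 : PySem.List.pyGetD ((List.range n).map g) (0 + (k : Int)) 0 = g k := by
    rw [show (0 + (k : Int)) = ((k : Nat) : Int) by ring, PySem.List.pyGetD_natCast,
      pv_getD_map_range g n k (by omega)]
  have h4 : PySem.List.pyGetD ((List.range n).map g) (0 + (k : Int) + 1) 0 = g (k + 1) := by
    rw [show (0 + (k : Int) + 1) = (((k + 1 : Nat)) : Int) by push_cast; ring,
      PySem.List.pyGetD_natCast, pv_getD_map_range g n (k + 1) (by omega)]
  rw [h1, h2, h3, h4]

-- B's loop invariant: after n ≥ 1 iterations the state is (partial sum, f (n-1), g (n-1))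
theorem pv_bfold (f g : Nat → Int) (n : Nat) (hn : 1 ≤ n) :
    (List.range n).foldl
        (fun (s : Int × Int × Int) k =>
          (if 0 < k then s.1 + (|f k - s.2.1| + |g k - s.2.2|) else s.1, f k, g k))
        (0, 0, 0)
      = ((List.range (n - 1)).foldl
          (fun t k => t + (|f (k + 1) - f k| + |g (k + 1) - g k|)) 0,
         f (n - 1), g (n - 1)) := by
  induction n with
  | zero => omega
  | succ n ih =>
    rcases Nat.eq_or_lt_of_le hn with h1 | h1
    · simp [← h1, List.range_succ]
    · have hn' : 1 ≤ n := by omega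
      rw [List.range_succ, List.foldl_append, ih hn']
      have hpos : 0 < n := hn'
      simp only [List.foldl_cons, List.foldl_nil, hpos, if_pos]
      have : n + 1 - 1 = (n - 1) + 1 := by omega
      rw [this, List.range_succ, List.foldl_append]
      simp only [List.foldl_cons, List.foldl_nil]
      have h2 : n - 1 + 1 = n := by omega
      rw [h2]

theorem pv_minmax (x y : Int) :
    ((if x < y then x else y) = min x y) ∧ ((if x < y then y else x) = max x y) := by
  constructor <;> split_ifs <;> omega

-- ===== VERDICT (by name: the statement is the Claim_ definition above) =====
theorem solve_spec : Claim_equal_solve := by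
  intro a b _hdom _hpre
  unfold Spec_solve solve solve_alt
  set n := a.length with hn
  set f : Nat → Int := fun k => min (a.getD k 0) (b.getD k 0) with hf
  set g : Nat → Int := fun k => max (a.getD k 0) (b.getD k 0) with hg
  -- A side
  have hA :
      (PySem.List.pyRange 0 (n : Int) 1).foldl
        (fun (s : List Int × List Int) i =>
          (s.1 ++ [min (PySem.List.pyGetD a i 0) (PySem.List.pyGetD b i 0)],
           s.2 ++ [max (PySem.List.pyGetD a i 0) (PySem.List.pyGetD b i 0)]))
        ([], [])
      = ((List.range n).map f, (List.range n).map g) := by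
    rw [PySem.List.pyRange_one]
    have : ((n : Int) - 0).toNat = n := by omega
    rw [this, List.foldl_map]
    have hcongr :
        (List.range n).foldl
          (fun (s : List Int × List Int) (k : Nat) =>
            (s.1 ++ [min (PySem.List.pyGetD a (0 + (k : Int)) 0) (PySem.List.pyGetD b (0 + (k : Int)) 0)],
             s.2 ++ [max (PySem.List.pyGetD a (0 + (k : Int)) 0) (PySem.List.pyGetD b (0 + (k : Int)) 0)]))
          ([], [])
        = (List.range n).foldl
            (fun (s : List Int × List Int) k => (s.1 ++ [f k], s.2 ++ [g k])) ([], []) := by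
      apply PySem.List.foldl_congr_mem
      intro acc k _
      have e : (0 + (k : Int)) = ((k : Nat) : Int) := by ring
      rw [e, PySem.List.pyGetD_natCast, PySem.List.pyGetD_natCast]
    rw [hcongr, pv_pairfold]
    simp
  rw [hA]
  -- B side: rewrite the fold body into pv_bfold's shape
  have hB :
      (PySem.List.pyRange 0 (n : Int) 1).foldl
        (fun (s : Int × Int × Int) i =>
          let x := PySem.List.pyGetD a i 0
          let y := PySem.List.pyGetD b i 0
          let curMin := if x < y then x else y
          let curMax := if x < y then y else x
          let total := if 0 < i then s.1 + (|curMin - s.2.1| + |curMax - s.2.2|) else s.1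
          (total, curMin, curMax))
        (0, 0, 0)
      = (List.range n).foldl
          (fun (s : Int × Int × Int) k =>
            (if 0 < k then s.1 + (|f k - s.2.1| + |g k - s.2.2|) else s.1, f k, g k))
          (0, 0, 0) := by
    rw [PySem.List.pyRange_one]
    have : ((n : Int) - 0).toNat = n := by omega
    rw [this, List.foldl_map]
    apply PySem.List.foldl_congr_mem
    intro acc k _
    have e : (0 + (k : Int)) = ((k : Nat) : Int) := by ring
    simp only [e, PySem.List.pyGetD_natCast]
    have h1 := pv_minmax (a.getD k 0) (b.getD k 0)
    simp only [h1.1, h1.2]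
    have hpos : (0 < ((k : Nat) : Int)) = (0 < k) := by
      simp
    simp only [hpos, hf, hg]
  rw [hB]
  -- both sides now closed forms over List.range
  rcases Nat.eq_zero_or_pos n with h0 | hpos
  · simp [h0, solveCalculate]
  · rw [pv_calc_eval f g n, pv_bfold f g n hpos]
    apply PySem.List.foldl_congr_mem
    intro acc k _
    rw [abs_sub_comm (f k) (f (k + 1)), abs_sub_comm (g k) (g (k + 1))]
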